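-- pv_equiv track=rewrite | github.com/fasmedeiros/NTT-DATA---Engenharia-de-Dados-com-Python | Desafio - Aplicando Técnicas de Listas em Python/desafio_2.py | produto_mais_vendido
-- ===== SOURCE A (Python) =====
-- def produto_mais_vendido(produtos):
--     contagem = {}
--
--     for produto in produtos:
--         if produto in contagem:
--             max_produto = None
--             contagem[produto] += 1
--         else:
--             contagem[produto] = 1
--
--     max_count = 0
--
--     for produto, count in contagem.items():
--         # TODO: Encontre o produto com a maior contagem:
--         if count > max_count:
--             max_count = count
--             max_produto = produto
--
--     return max_produto
-- ===== SOURCE B (Python) =====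
-- def produto_mais_vendido(produtos):
--     pares = sorted((produto, i) for i, produto in enumerate(produtos))
--     melhor = None
--     melhor_contagem = 0
--     melhor_inicio = 0
--     j = 0
--     while j < len(pares):
--         produto, inicio = pares[j]
--         k = j + 1
--         while k < len(pares) and pares[k][0] == produto:
--             k += 1
--         contagem = k - j
--         if contagem > melhor_contagem or (contagem == melhor_contagem and inicio < melhor_inicio):
--             melhor_contagem = contagem
--             melhor_inicio = inicio
--             melhor = produto
--         j = k
--     return melhor
-- ===== Notes on version B (the rewrite author's own statement) =====
-- stated objective: alternative
-- what changed: B drops A's counting dictionary and dict-items argmax scan entirely: it sorts (product, index) pairs and scans the runs of equal products once, keeping the run with the larger count (smaller first index on ties).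
import Mathlib
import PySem

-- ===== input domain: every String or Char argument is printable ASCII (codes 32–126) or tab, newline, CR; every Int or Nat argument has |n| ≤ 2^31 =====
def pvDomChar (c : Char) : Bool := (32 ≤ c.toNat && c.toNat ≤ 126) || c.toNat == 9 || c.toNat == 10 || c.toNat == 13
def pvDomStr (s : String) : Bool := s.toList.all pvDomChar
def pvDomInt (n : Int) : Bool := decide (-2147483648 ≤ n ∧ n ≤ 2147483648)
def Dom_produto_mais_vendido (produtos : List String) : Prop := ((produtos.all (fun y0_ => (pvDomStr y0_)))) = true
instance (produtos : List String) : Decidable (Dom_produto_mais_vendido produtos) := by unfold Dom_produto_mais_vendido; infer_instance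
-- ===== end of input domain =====

-- B drops A's counting dictionary entirely: it sorts (product, index) pairs and scans the runs of equal products once, tie-breaking by smaller first index (objective: alternative).

-- ===== PORT A =====
def produto_mais_vendido (produtos : List String) : Option String :=
  let st := produtos.foldl
    (fun (st : PySem.Dict String Int × Option String) produto =>
      if st.1.contains produto then (st.1.modify produto 0 (· + 1), none)
      else (st.1.insert produto 1, st.2))
    (PySem.Dict.empty, none)
  (st.1.items.foldl
    (fun (acc : Int × Option String) pc =>
      if pc.2 > acc.1 then (pc.2, some pc.1) else acc)
    (0, st.2)).2

-- ===== PORT B =====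
-- B's outer while loop over the sorted pairs, one recursive call per run of equal products:
-- the inner `while pares[k][0] == produto: k += 1` is the takeWhile/dropWhile split of the tail,
-- `contagem = k - j` is 1 + (length of the takeWhile part).
def scanRuns : List (String × Int) → Option String → Int → Int → Option String
  | [], melhor, _, _ => melhor
  | (produto, inicio) :: rest, melhor, melhor_contagem, melhor_inicio =>
    let same := rest.takeWhile (fun q => q.1 == produto)
    let other := rest.dropWhile (fun q => q.1 == produto)
    let contagem : Int := (same.length : Int) + 1
    if contagem > melhor_contagem ∨ (contagem = melhor_contagem ∧ inicio < melhor_inicio) then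
      scanRuns other (some produto) contagem inicio
    else
      scanRuns other melhor melhor_contagem melhor_inicio
termination_by l => l.length
decreasing_by
  all_goals
    exact Nat.lt_succ_of_le (List.length_dropWhile_le _ _)

-- sorted(list of (str, int) tuples) is Python's lexicographic tuple sort = sorted2 on the two components.
def produto_mais_vendido_alt (produtos : List String) : Option String :=
  let pares := PySem.List.sorted2
    ((PySem.List.enumerate produtos).map (fun q => (q.2, q.1)))
    (fun t => t.1) (fun t => t.2) false
  scanRuns pares none 0 0

-- ===== PRECONDITION & SPEC =====
-- Pre_ excludes only the empty list, on which Python A raises UnboundLocalError (max_produto is never assigned); B returns None there.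
def Pre_produto_mais_vendido (produtos : List String) : Prop := produtos ≠ []
instance (produtos : List String) : Decidable (Pre_produto_mais_vendido produtos) := by unfold Pre_produto_mais_vendido; infer_instance
def pvWitness_produto_mais_vendido : List String := (["a", "b", "a"])

def Spec_produto_mais_vendido (produtos : List String) (out : Option String) : Prop := out = produto_mais_vendido_alt produtos
instance (produtos : List String) (out : Option String) : Decidable (Spec_produto_mais_vendido produtos out) := by unfold Spec_produto_mais_vendido; infer_instance

-- ===== CLAIM (what is proved, stated in full; the proofs are below) =====
def Claim_equal_produto_mais_vendido : Prop := ∀ (produtos : List String), Dom_produto_mais_vendido produtos → Pre_produto_mais_vendido produtos → Spec_produto_mais_vendido produtos (produto_mais_vendido produtos)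

-- ===== LEMMAS AND PROOFS =====

-- the count and the first-occurrence index of a product, as integers
def cnt (xs : List String) (p : String) : Int := (xs.count p : Int)
def fst_idx (xs : List String) (p : String) : Int := (xs.idxOf p : Int)

-- the value both programs return: the product with maximal count whose first occurrence is earliest
def Good (xs : List String) (p : String) : Prop :=
  p ∈ xs ∧ ∀ q ∈ xs, cnt xs q < cnt xs p ∨ (cnt xs q = cnt xs p ∧ fst_idx xs p ≤ fst_idx xs q)

theorem good_unique (xs : List String) (r r' : String) (h : Good xs r) (h' : Good xs r') : r = r' := by
  obtain ⟨hr, h2⟩ := h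
  obtain ⟨hr', h2'⟩ := h'
  rcases h2 r' hr' with hlt | ⟨hceq, hle⟩
  · rcases h2' r hr with hlt' | ⟨hceq', hle'⟩
    · exact absurd (hlt.trans hlt') (lt_irrefl _)
    · omega
  · rcases h2' r hr with hlt' | ⟨hceq', hle'⟩
    · omega
    · have hidx : xs.idxOf r = xs.idxOf r' := by
        unfold fst_idx at hle hle'
        omega
      exact (List.idxOf_inj hr).mp hidx

-- ---------- A-side ----------

def stepA (st : PySem.Dict String Int × Option String) (produto : String) :
    PySem.Dict String Int × Option String :=
  if st.1.contains produto then (st.1.modify produto 0 (· + 1), none)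
  else (st.1.insert produto 1, st.2)

def stepMax (c : String → Int) (acc : Option String × Int) (x : String) : Option String × Int :=
  if c x > acc.2 then (some x, c x) else acc

-- when a key is absent, Python's `d[k] = 1` equals `d[k] = d.get(k,0) + 1`
theorem modify_absent (d : PySem.Dict String Int) (x : String) (h : d.contains x = false) :
    d.modify x 0 (· + 1) = d.insert x 1 := by
  simp [PySem.Dict.modify, PySem.Dict.insert, h,
    PySem.Dict.getD_of_not_contains (d := d) (h := h)]

-- max_produto is still none/unbound after A's first loop
theorem stepA_snd (l : List String) (d : PySem.Dict String Int) :
    (l.foldl stepA (d, (none : Option String))).2 = none := by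
  induction l generalizing d with
  | nil => rfl
  | cons x l ih =>
    by_cases hc : d.contains x = true <;>
      simp [List.foldl_cons, stepA, hc, ih]

-- A's first loop builds exactly Counter(produtos)
theorem stepA_fst (l : List String) (d : PySem.Dict String Int) (m : Option String) :
    (l.foldl stepA (d, m)).1 = l.foldl (fun d x => d.modify x 0 (· + 1)) d := by
  induction l generalizing d m with
  | nil => rfl
  | cons x l ih =>
    by_cases hc : d.contains x = true
    · simp [List.foldl_cons, stepA, hc, ih]
    · simp only [Bool.not_eq_true] at hc
      simp [List.foldl_cons, stepA, hc, ih, modify_absent d x hc]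

-- A's second loop over (key, count) pairs is a running strict max over the keys with the pair swapped
theorem swap_fold (c : String → Int) (l : List String) (a : Int) (m : Option String) :
    ((l.map (fun k => (k, c k))).foldl
       (fun (acc : Int × Option String) pc =>
         if pc.2 > acc.1 then (pc.2, some pc.1) else acc) (a, m)).2
    = (l.foldl (stepMax c) (m, a)).1 := by
  induction l generalizing a m with
  | nil => rfl
  | cons x l ih =>
    by_cases h : c x > a <;> simp [List.foldl_cons, stepMax, h, ih]

-- A is the strict-max scan over the distinct products in first-occurrence order
theorem A_eq_fold (xs : List String) :
    produto_mais_vendido xs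
      = ((PySem.Set.ofList xs).foldl (stepMax (cnt xs)) (none, 0)).1 := by
  show ((xs.foldl stepA (PySem.Dict.empty, none)).1.items.foldl
    (fun (acc : Int × Option String) pc =>
      if pc.2 > acc.1 then (pc.2, some pc.1) else acc)
    (0, (xs.foldl stepA (PySem.Dict.empty, none)).2)).2 = _
  rw [stepA_snd, stepA_fst, ← PySem.Dict.counter_eq_foldl, PySem.Dict.items_counter,
    swap_fold (fun k => (xs.count k : Int))]
  rfl

-- ordered dedup carrying the already-seen elements (= PySem.Set.ofList with explicit seen set)
def mydedup (s : List String) : List String → List String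
  | [] => []
  | x :: l => if x ∈ s then mydedup s l else x :: mydedup (x :: s) l

theorem mem_mydedup : ∀ (l s : List String) (y : String), y ∈ mydedup s l → y ∈ l ∧ y ∉ s := by
  intro l
  induction l with
  | nil => intro s y h; simp [mydedup] at h
  | cons x l ih =>
    intro s y h
    by_cases hx : x ∈ s
    · simp only [mydedup, if_pos hx] at h
      obtain ⟨h1, h2⟩ := ih s y h
      exact ⟨List.mem_cons_of_mem x h1, h2⟩
    · simp only [mydedup, if_neg hx] at h
      rcases List.mem_cons.mp h with rfl | h
      · exact ⟨List.mem_cons_self, hx⟩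
      · obtain ⟨h1, h2⟩ := ih (x :: s) y h
        have hyne : y ∉ s := fun hm => h2 (List.mem_cons_of_mem x hm)
        exact ⟨List.mem_cons_of_mem x h1, hyne⟩

theorem mydedup_ext (l : List String) (s s' : List String)
    (h : ∀ x, x ∈ s ↔ x ∈ s') : mydedup s l = mydedup s' l := by
  induction l generalizing s s' with
  | nil => rfl
  | cons x l ih =>
    by_cases hx : x ∈ s
    · simp [mydedup, hx, (h x).mp hx, ih s s' h]
    · have hx' : x ∉ s' := fun hm => hx ((h x).mpr hm)
      simp [mydedup, hx, hx']
      exact ih _ _ (by intro y; simp [h y])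

theorem ofList_eq_mydedup_aux (l : List String) (acc : List String) :
    l.foldl PySem.Set.add acc = acc ++ mydedup acc l := by
  induction l generalizing acc with
  | nil => simp [mydedup]
  | cons x l ih =>
    by_cases hx : x ∈ acc
    · simp [List.foldl_cons, PySem.Set.add, PySem.Set.contains, hx, mydedup, ih]
    · simp only [List.foldl_cons, PySem.Set.add, PySem.Set.contains, mydedup]
      rw [if_neg (by simp [hx]), if_neg hx, ih (acc ++ [x])]
      simp
      exact mydedup_ext l _ _ (by intro y; simp; tauto)

theorem ofList_eq_mydedup (l : List String) :
    PySem.Set.ofList l = mydedup [] l := by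
  rw [PySem.Set.ofList_eq_foldl, ofList_eq_mydedup_aux]
  simp

-- the distinct products in first-occurrence order have strictly increasing first indices
theorem mydedup_pairwise : ∀ (l s : List String),
    (mydedup s l).Pairwise (fun a b => l.idxOf a < l.idxOf b) := by
  intro l
  induction l with
  | nil => intro s; simp [mydedup]
  | cons x l ih =>
    intro s
    by_cases hx : x ∈ s
    · simp only [mydedup, if_pos hx]
      refine (ih s).imp_of_mem ?_
      intro a b ha hb hab
      have hna : a ≠ x := fun h => (mem_mydedup l s a ha).2 (h ▸ hx)
      have hnb : b ≠ x := fun h => (mem_mydedup l s b hb).2 (h ▸ hx)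
      rw [List.idxOf_cons_ne _ (Ne.symm hna), List.idxOf_cons_ne _ (Ne.symm hnb)]
      omega
    · simp only [mydedup, if_neg hx]
      constructor
      · intro b hb
        have hnb : b ≠ x := fun h =>
          (mem_mydedup l (x :: s) b hb).2 (h ▸ List.mem_cons_self)
        rw [List.idxOf_cons_self, List.idxOf_cons_ne _ (Ne.symm hnb)]
        omega
      · refine (ih (x :: s)).imp_of_mem ?_
        intro a b ha hb hab
        have hna : a ≠ x := fun h =>
          (mem_mydedup l (x :: s) a ha).2 (h ▸ List.mem_cons_self)
        have hnb : b ≠ x := fun h =>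
          (mem_mydedup l (x :: s) b hb).2 (h ▸ List.mem_cons_self)
        rw [List.idxOf_cons_ne _ (Ne.symm hna), List.idxOf_cons_ne _ (Ne.symm hnb)]
        omega

theorem ofList_pairwise_fst_idx (xs : List String) :
    (PySem.Set.ofList xs).Pairwise (fun a b => fst_idx xs a < fst_idx xs b) := by
  rw [ofList_eq_mydedup]
  refine (mydedup_pairwise xs []).imp ?_
  intro a b h
  unfold fst_idx
  exact_mod_cast h

-- the strict-max scan over a list with strictly increasing first indices returns the Good-style argmax
theorem foldA_spec (c fi : String → Int) :
    ∀ (l : List String) (m : String),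
      l.Pairwise (fun a b => fi a < fi b) →
      (∀ x ∈ l, fi m < fi x) →
      ∃ r, l.foldl (stepMax c) (some m, c m) = (some r, c r)
        ∧ (r = m ∨ r ∈ l)
        ∧ ∀ q, (q = m ∨ q ∈ l) → c q < c r ∨ (c q = c r ∧ fi r ≤ fi q) := by
  intro l
  induction l with
  | nil =>
    intro m _ _
    refine ⟨m, rfl, Or.inl rfl, ?_⟩
    rintro q (rfl | h)
    · exact Or.inr ⟨rfl, le_refl _⟩
    · simp at h
  | cons x l ih =>
    intro m hpw hfm
    obtain ⟨hhead, htail⟩ := List.pairwise_cons.mp hpw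
    by_cases hc : c x > c m
    · have hstep : stepMax c (some m, c m) x = (some x, c x) := by simp [stepMax, hc]
      rw [List.foldl_cons, hstep]
      obtain ⟨r, hr, hmem, hall⟩ := ih x htail hhead
      refine ⟨r, hr, ?_, ?_⟩
      · rcases hmem with rfl | h
        · exact Or.inr List.mem_cons_self
        · exact Or.inr (List.mem_cons_of_mem _ h)
      · rintro q (rfl | hq)
        · rcases hall x (Or.inl rfl) with h1 | ⟨h1, h2⟩ <;> (left; omega)
        · rcases List.mem_cons.mp hq with rfl | hq'
          · exact hall q (Or.inl rfl)
          · exact hall q (Or.inr hq')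
    · have hstep : stepMax c (some m, c m) x = (some m, c m) := by simp [stepMax, hc]
      rw [List.foldl_cons, hstep]
      obtain ⟨r, hr, hmem, hall⟩ := ih m htail
        (fun y hy => hfm y (List.mem_cons_of_mem _ hy))
      refine ⟨r, hr, ?_, ?_⟩
      · rcases hmem with rfl | h
        · exact Or.inl rfl
        · exact Or.inr (List.mem_cons_of_mem _ h)
      · rintro q (rfl | hq)
        · exact hall q (Or.inl rfl)
        · rcases List.mem_cons.mp hq with rfl | hq'
          · have hxm : fi m < fi q := hfm q List.mem_cons_self
            rcases hall m (Or.inl rfl) with h1 | ⟨h1, h2⟩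
            · left; omega
            · by_cases h3 : c q < c m
              · left; omega
              · right; exact ⟨by omega, by omega⟩
          · exact hall q (Or.inr hq')

theorem A_good (xs : List String) (hne : xs ≠ []) :
    ∃ r, produto_mais_vendido xs = some r ∧ Good xs r := by
  rw [A_eq_fold]
  cases hS : PySem.Set.ofList xs with
  | nil =>
    exfalso
    obtain ⟨z, zs, rfl⟩ := List.exists_cons_of_ne_nil hne
    have hz : z ∈ PySem.Set.ofList (z :: zs) :=
      (PySem.Set.mem_ofList _ _).mpr List.mem_cons_self
    rw [hS] at hz
    simp at hz
  | cons y t =>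
    have hpw := ofList_pairwise_fst_idx xs
    rw [hS] at hpw
    obtain ⟨hhead, htail⟩ := List.pairwise_cons.mp hpw
    have hymem : y ∈ xs := by
      have : y ∈ PySem.Set.ofList xs := by rw [hS]; exact List.mem_cons_self
      exact (PySem.Set.mem_ofList _ _).mp this
    have hcy : cnt xs y > 0 := by
      unfold cnt
      exact_mod_cast List.count_pos_iff.mpr hymem
    rw [List.foldl_cons]
    have hstep : stepMax (cnt xs) (none, 0) y = (some y, cnt xs y) := by
      simp [stepMax, hcy]
    rw [hstep]
    obtain ⟨r, hr, hmem, hall⟩ := foldA_spec (cnt xs) (fst_idx xs) t y htail hhead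
    rw [hr]
    refine ⟨r, rfl, ?_, ?_⟩
    · have : r ∈ PySem.Set.ofList xs := by
        rw [hS]
        rcases hmem with rfl | h
        · exact List.mem_cons_self
        · exact List.mem_cons_of_mem _ h
      exact (PySem.Set.mem_ofList _ _).mp this
    · intro q hq
      have : q ∈ PySem.Set.ofList xs := by
        rw [PySem.Set.mem_ofList]
        exact hq
      rw [hS] at this
      rcases List.mem_cons.mp this with rfl | hq'
      · exact hall q (Or.inl rfl)
      · exact hall q (Or.inr hq')

-- ---------- B-side ----------

-- lexicographic ≤ on (product, index) pairs: Python's tuple order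
def lexle (a b : String × Int) : Prop := a.1 < b.1 ∨ (a.1 = b.1 ∧ a.2 ≤ b.2)

-- the comparator sorted2 uses (strict lexicographic <)
def bcmp (a b : String × Int) : Bool :=
  decide (a.1 < b.1) || (!decide (b.1 < a.1) && decide (a.2 < b.2))

theorem lexle_trans : ∀ {a b c : String × Int}, lexle a b → lexle b c → lexle a c := by
  intro a b c hab hbc
  rcases hab with h1 | ⟨h1, h2⟩ <;> rcases hbc with h3 | ⟨h3, h4⟩
  · exact Or.inl (h1.trans h3)
  · exact Or.inl (h3 ▸ h1)
  · exact Or.inl (h1 ▸ h3)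
  · exact Or.inr ⟨h1.trans h3, h2.trans h4⟩

theorem bcmp_true {a b : String × Int} (h : bcmp a b = true) : lexle a b := by
  unfold bcmp at h
  simp only [Bool.or_eq_true, Bool.and_eq_true, Bool.not_eq_true', decide_eq_true_eq,
    decide_eq_false_iff_not] at h
  rcases h with h | ⟨h1, h2⟩
  · exact Or.inl h
  · by_cases h3 : a.1 < b.1
    · exact Or.inl h3
    · exact Or.inr ⟨le_antisymm (not_lt.mp h1) (not_lt.mp h3), le_of_lt h2⟩

theorem bcmp_false {a b : String × Int} (h : bcmp a b = false) : lexle b a := by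
  unfold bcmp at h
  simp only [Bool.or_eq_false_iff, Bool.and_eq_false_iff, Bool.not_eq_false',
    decide_eq_true_eq, decide_eq_false_iff_not] at h
  obtain ⟨h1, h2⟩ := h
  rcases h2 with h2 | h2
  · exact Or.inl h2
  · by_cases hba : b.1 < a.1
    · exact Or.inl hba
    · exact Or.inr ⟨le_antisymm (not_lt.mp h1) (not_lt.mp hba), not_lt.mp h2⟩

theorem insertBy_lex_pairwise (x : String × Int) (ys : List (String × Int))
    (h : ys.Pairwise lexle) : (PySem.List.insertBy bcmp x ys).Pairwise lexle := by
  induction ys with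
  | nil => simp [PySem.List.insertBy]
  | cons y ys ih =>
    obtain ⟨hhead, htail⟩ := List.pairwise_cons.mp h
    by_cases hb : bcmp x y = true
    · simp only [PySem.List.insertBy, hb, if_pos]
      refine List.pairwise_cons.mpr ⟨?_, h⟩
      intro z hz
      rcases List.mem_cons.mp hz with rfl | hz'
      · exact bcmp_true hb
      · exact lexle_trans (bcmp_true hb) (hhead z hz')
    · simp only [Bool.not_eq_true] at hb
      simp only [PySem.List.insertBy, hb, Bool.false_eq_true, if_neg, not_false_iff]
      refine List.pairwise_cons.mpr ⟨?_, ih htail⟩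
      intro z hz
      rcases (PySem.List.mem_insertBy _ _ _ _).mp hz with rfl | hz'
      · exact bcmp_false hb
      · exact hhead z hz'

theorem sorted2_pairwise_lex (l : List (String × Int)) :
    (PySem.List.sorted2 l (fun t => t.1) (fun t => t.2) false).Pairwise lexle := by
  show (l.foldl (fun acc x => PySem.List.insertBy bcmp x acc) []).Pairwise lexle
  have main : ∀ (l acc : List (String × Int)), acc.Pairwise lexle →
      (l.foldl (fun acc x => PySem.List.insertBy bcmp x acc) acc).Pairwise lexle := by
    intro l
    induction l with
    | nil => intro acc hacc; exact hacc
    | cons x l ih =>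
      intro acc hacc
      exact ih _ (insertBy_lex_pairwise x acc hacc)
  exact main l [] (by simp)

-- enumerate-based pair list: (product, index) pairs
def epairs (xs : List String) : List (String × Int) :=
  (PySem.List.enumerate xs).map (fun q => (q.2, q.1))

theorem countP_epairs_aux (p : String) :
    ∀ (xs : List String) (s : Int),
      ((PySem.List.enumerate xs s).map (fun q => (q.2, q.1))).countP (fun q => q.1 == p)
        = xs.count p := by
  intro xs
  induction xs with
  | nil => intro s; simp [PySem.List.enumerate_nil]
  | cons x xs ih =>
    intro s
    simp [PySem.List.enumerate_cons, List.countP_cons, List.count_cons, ih]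

theorem countP_epairs (xs : List String) (p : String) :
    (epairs xs).countP (fun q => q.1 == p) = xs.count p := by
  unfold epairs
  exact countP_epairs_aux p xs 0

-- the first occurrence index is a lower bound for every occurrence
theorem idxOf_le_of_getElem : ∀ (xs : List String) (k : Nat) (hk : k < xs.length),
    xs.idxOf xs[k] ≤ k := by
  intro xs
  induction xs with
  | nil => intro k hk; simp at hk
  | cons x xs ih =>
    intro k hk
    cases k with
    | zero => simp
    | succ k =>
      have hk' : k < xs.length := by
        simp only [List.length_cons] at hk
        omega
      by_cases hx : x = xs[k]
      · rw [List.getElem_cons_succ, ← hx, List.idxOf_cons_self]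
        omega
      · rw [List.getElem_cons_succ, List.idxOf_cons_ne _ (by exact hx)]
        have := ih k hk'
        omega

theorem of_epairs_mem (xs : List String) (p : String) (j : Int)
    (h : (p, j) ∈ epairs xs) : p ∈ xs ∧ fst_idx xs p ≤ j := by
  unfold epairs at h
  obtain ⟨q, hq, hqe⟩ := List.mem_map.mp h
  obtain ⟨k, hk, hqk⟩ := (PySem.List.mem_enumerate_iff _ _ _).mp hq
  have hp : p = xs[k] := by
    rw [hqk] at hqe
    exact (Prod.mk.injEq _ _ _ _ ▸ hqe).1.symm
  have hj : j = (k : Int) := by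
    rw [hqk] at hqe
    have := (Prod.mk.injEq _ _ _ _ ▸ hqe).2
    omega
  subst hp
  refine ⟨List.getElem_mem hk, ?_⟩
  unfold fst_idx
  have := idxOf_le_of_getElem xs k hk
  omega

theorem epairs_mem_of (xs : List String) (p : String) (h : p ∈ xs) :
    (p, fst_idx xs p) ∈ epairs xs := by
  unfold epairs
  refine List.mem_map.mpr ⟨((xs.idxOf p : Int), p), ?_, rfl⟩
  refine (PySem.List.mem_enumerate_iff _ _ _).mpr ⟨xs.idxOf p, List.idxOf_lt_length_of_mem h, ?_⟩
  rw [List.getElem_idxOf]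
  simp

-- in a lex-sorted list whose keys all dominate p, the dropWhile part contains no p-pairs
theorem dropWhile_ne (p : String) : ∀ (rest : List (String × Int)),
    rest.Pairwise lexle → (∀ q ∈ rest, p ≤ q.1) →
    ∀ z ∈ rest.dropWhile (fun q => q.1 == p), z.1 ≠ p := by
  intro rest
  induction rest with
  | nil => intro _ _ z hz; simp at hz
  | cons y rest ih =>
    intro hpw hge z hz
    obtain ⟨hhead, htail⟩ := List.pairwise_cons.mp hpw
    by_cases hy : (y.1 == p) = true
    · rw [List.dropWhile_cons, if_pos hy] at hz
      exact ih htail (fun q hq => hge q (List.mem_cons_of_mem _ hq)) z hz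
    · rw [List.dropWhile_cons, if_neg hy] at hz
      have hyne : y.1 ≠ p := by simpa using hy
      have hylt : p < y.1 := lt_of_le_of_ne (hge y List.mem_cons_self) (Ne.symm hyne)
      rcases List.mem_cons.mp hz with rfl | hz'
      · exact hyne
      · have : y.1 ≤ z.1 := by
          rcases hhead z hz' with h | ⟨h, _⟩
          · exact le_of_lt h
          · exact le_of_eq h
        intro hzp
        rw [hzp] at this
        exact absurd (lt_of_lt_of_le hylt this) (lt_irrefl _)

-- unfolding equation for scanRuns on a nonempty list
theorem scanRuns_cons (p : String) (i : Int) (rest : List (String × Int))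
    (mo : Option String) (mc mi : Int) :
    scanRuns ((p, i) :: rest) mo mc mi =
      (if ((rest.takeWhile (fun q => q.1 == p)).length : Int) + 1 > mc
          ∨ (((rest.takeWhile (fun q => q.1 == p)).length : Int) + 1 = mc ∧ i < mi) then
        scanRuns (rest.dropWhile (fun q => q.1 == p)) (some p)
          (((rest.takeWhile (fun q => q.1 == p)).length : Int) + 1) i
      else
        scanRuns (rest.dropWhile (fun q => q.1 == p)) mo mc mi) := by
  rw [scanRuns]

-- the head run of a lex-sorted pair list carries the global count and first index of its product
theorem group_facts (p : String) (i : Int) (rest : List (String × Int)) (c fi : String → Int)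
    (hpw : ((p, i) :: rest).Pairwise lexle)
    (Hcnt : ∀ p' i', (p', i') ∈ (p, i) :: rest →
      ((((p, i) :: rest).countP (fun q => q.1 == p') : Int) = c p'))
    (Hmem : ∀ p' i', (p', i') ∈ (p, i) :: rest → (p', fi p') ∈ (p, i) :: rest)
    (Hmin : ∀ p' i', (p', i') ∈ (p, i) :: rest → fi p' ≤ i') :
    ((((rest.takeWhile (fun q => q.1 == p)).length : Int) + 1 = c p)
    ∧ i = fi p)
    ∧ ((rest.dropWhile (fun q => q.1 == p)).Pairwise lexle
    ∧ (∀ p' i', (p', i') ∈ rest.dropWhile (fun q => q.1 == p) →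
        (((rest.dropWhile (fun q => q.1 == p)).countP (fun q => q.1 == p') : Int) = c p'))
    ∧ (∀ p' i', (p', i') ∈ rest.dropWhile (fun q => q.1 == p) →
        (p', fi p') ∈ rest.dropWhile (fun q => q.1 == p))
    ∧ (∀ p' i', (p', i') ∈ rest.dropWhile (fun q => q.1 == p) → fi p' ≤ i'))
    ∧ (∀ q j, (q, j) ∈ (p, i) :: rest → q = p ∨ (q, j) ∈ rest.dropWhile (fun q => q.1 == p)) := by
  obtain ⟨hhead, htail⟩ := List.pairwise_cons.mp hpw
  set same := rest.takeWhile (fun q => q.1 == p) with hsame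
  set other := rest.dropWhile (fun q => q.1 == p) with hother
  have hsplit : rest = same ++ other := (List.takeWhile_append_dropWhile).symm
  have hsame_eq : ∀ q ∈ same, q.1 = p := by
    intro q hq
    have := List.mem_takeWhile_imp hq
    simpa using this
  have hother_ne : ∀ z ∈ other, z.1 ≠ p := by
    refine dropWhile_ne p rest htail ?_
    intro q hq
    rcases hhead q hq with h | ⟨h, _⟩
    · exact le_of_lt h
    · exact le_of_eq h
  have hother_mem : ∀ q, q ∈ other → q ∈ (p, i) :: rest := by
    intro q hq
    exact List.mem_cons_of_mem _ (hsplit ▸ List.mem_append_right _ hq)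
  have hdecomp : ∀ q j, (q, j) ∈ (p, i) :: rest → q = p ∨ (q, j) ∈ other := by
    intro q j hq
    rcases List.mem_cons.mp hq with heq | hq'
    · left; exact (Prod.mk.injEq _ _ _ _ ▸ heq).1
    · rw [hsplit] at hq'
      rcases List.mem_append.mp hq' with h | h
      · left; exact hsame_eq _ h
      · right; exact h
  have hcountP : (((p, i) :: rest).countP (fun q => q.1 == p) : Int) = (same.length : Int) + 1 := by
    rw [List.countP_cons]
    simp only [hsplit, List.countP_append]
    have h1 : same.countP (fun q => q.1 == p) = same.length :=
      List.countP_eq_length.mpr (fun q hq => by simp [hsame_eq q hq])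
    have h2 : other.countP (fun q => q.1 == p) = 0 :=
      List.countP_eq_zero.mpr (fun q hq => by simp [hother_ne q hq])
    simp [h1, h2]
  have hc : ((same.length : Int) + 1 = c p) := by
    rw [← hcountP]
    exact Hcnt p i List.mem_cons_self
  have hfi : i = fi p := by
    have h1 : fi p ≤ i := Hmin p i List.mem_cons_self
    have h2 : (p, fi p) ∈ (p, i) :: rest := Hmem p i List.mem_cons_self
    have h3 : i ≤ fi p := by
      rcases List.mem_cons.mp h2 with heq | h2'
      · have := (Prod.mk.injEq _ _ _ _ ▸ heq).2
        omega
      · rw [hsplit] at h2'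
        rcases List.mem_append.mp h2' with h | h
        · rcases hhead _ ((hsplit ▸ List.mem_append_left other h) :
            (p, fi p) ∈ rest) with hlt | ⟨_, hle⟩
          · exact absurd hlt (lt_irrefl _)
          · exact hle
        · exact absurd rfl (hother_ne _ h)
    omega
  have hcnt' : ∀ p' i', (p', i') ∈ other → ((other.countP (fun q => q.1 == p') : Int) = c p') := by
    intro p' i' hmem
    have hne : p' ≠ p := hother_ne _ hmem
    have : (((p, i) :: rest).countP (fun q => q.1 == p') : Int) = c p' :=
      Hcnt p' i' (hother_mem _ hmem)
    rw [← this, List.countP_cons]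
    simp only [hsplit, List.countP_append]
    have h1 : same.countP (fun q => q.1 == p') = 0 :=
      List.countP_eq_zero.mpr (fun q hq => by simp [hsame_eq q hq, Ne.symm hne])
    simp [h1, Ne.symm hne]
  have hmem' : ∀ p' i', (p', i') ∈ other → (p', fi p') ∈ other := by
    intro p' i' hmem
    have hne : p' ≠ p := hother_ne _ hmem
    have := Hmem p' i' (hother_mem _ hmem)
    rcases hdecomp p' (fi p') this with heq | h
    · exact absurd heq hne
    · exact h
  have hmin' : ∀ p' i', (p', i') ∈ other → fi p' ≤ i' := by
    intro p' i' hmem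
    exact Hmin p' i' (hother_mem _ hmem)
  have hpw' : other.Pairwise lexle :=
    hpw.sublist ((List.dropWhile_sublist _).cons _)
  exact ⟨⟨hc, hfi⟩, ⟨hpw', hcnt', hmem', hmin'⟩, hdecomp⟩

-- the run scan over lex-sorted pairs whose runs carry global counts and first indices returns the Good-style argmax
theorem scanRuns_some (c fi : String → Int) :
    ∀ (n : Nat) (l : List (String × Int)), l.length ≤ n → ∀ (m : String),
      l.Pairwise lexle →
      (∀ p i, (p, i) ∈ l → ((l.countP (fun q => q.1 == p) : Int) = c p)) →
      (∀ p i, (p, i) ∈ l → (p, fi p) ∈ l) →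
      (∀ p i, (p, i) ∈ l → fi p ≤ i) →
      ∃ r, scanRuns l (some m) (c m) (fi m) = some r
        ∧ (r = m ∨ ∃ i, (r, i) ∈ l)
        ∧ ∀ q, (q = m ∨ ∃ i, (q, i) ∈ l) → c q < c r ∨ (c q = c r ∧ fi r ≤ fi q) := by
  intro n
  induction n with
  | zero =>
    intro l hl m _ _ _ _
    have hnil : l = [] := List.eq_nil_of_length_eq_zero (Nat.le_zero.mp hl)
    subst hnil
    refine ⟨m, by rw [scanRuns], Or.inl rfl, ?_⟩
    rintro q (rfl | ⟨i, hi⟩)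
    · exact Or.inr ⟨rfl, le_refl _⟩
    · simp at hi
  | succ n ih =>
    intro l hl m hpw Hcnt Hmem Hmin
    cases l with
    | nil =>
      refine ⟨m, by rw [scanRuns], Or.inl rfl, ?_⟩
      rintro q (rfl | ⟨i, hi⟩)
      · exact Or.inr ⟨rfl, le_refl _⟩
      · simp at hi
    | cons hd rest =>
      obtain ⟨p, i⟩ := hd
      obtain ⟨⟨hc, hfi⟩, ⟨hpw', hcnt', hmem', hmin'⟩, hdecomp⟩ :=
        group_facts p i rest c fi hpw Hcnt Hmem Hmin
      have hlen : (rest.dropWhile (fun q => q.1 == p)).length ≤ n := by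
        have h1 := List.length_dropWhile_le (fun q => q.1 == p) rest
        simp only [List.length_cons] at hl
        omega
      subst hfi
      rw [scanRuns_cons, hc]
      by_cases hcond : c p > c m ∨ (c p = c m ∧ fi p < fi m)
      · rw [if_pos hcond]
        obtain ⟨r, hr, hmemr, hall⟩ :=
          ih (rest.dropWhile (fun q => q.1 == p)) hlen p hpw' hcnt' hmem' hmin'
        refine ⟨r, hr, ?_, ?_⟩
        · rcases hmemr with rfl | ⟨j, hj⟩
          · exact Or.inr ⟨fi r, List.mem_cons_self⟩
          · exact Or.inr ⟨j, List.mem_cons_of_mem _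
              (List.takeWhile_append_dropWhile (p := fun q => q.1 == p) (l := rest) ▸
                List.mem_append_right _ hj)⟩
        · rintro q (rfl | ⟨j, hj⟩)
          · rcases hall p (Or.inl rfl) with h1 | ⟨h1, h2⟩ <;> rcases hcond with hc1 | ⟨hc1, hc2⟩
            · left; omega
            · left; omega
            · left; omega
            · right; constructor <;> omega
          · rcases hdecomp q j hj with rfl | h
            · exact hall q (Or.inl rfl)
            · exact hall q (Or.inr ⟨j, h⟩)
      · rw [if_neg hcond]
        push Not at hcond
        obtain ⟨hc1, hc2⟩ := hcond
        obtain ⟨r, hr, hmemr, hall⟩ :=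
          ih (rest.dropWhile (fun q => q.1 == p)) hlen m hpw' hcnt' hmem' hmin'
        refine ⟨r, hr, ?_, ?_⟩
        · rcases hmemr with rfl | ⟨j, hj⟩
          · exact Or.inl rfl
          · exact Or.inr ⟨j, List.mem_cons_of_mem _
              (List.takeWhile_append_dropWhile (p := fun q => q.1 == p) (l := rest) ▸
                List.mem_append_right _ hj)⟩
        · rintro q (rfl | ⟨j, hj⟩)
          · exact hall q (Or.inl rfl)
          · rcases hdecomp q j hj with rfl | h
            · rcases hall m (Or.inl rfl) with h1 | ⟨h1, h2⟩
              · left; omega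
              · by_cases h3 : c q < c m
                · left; omega
                · have hqm : c q = c m := by omega
                  right
                  refine ⟨by omega, ?_⟩
                  have := hc2 hqm
                  omega
            · exact hall q (Or.inr ⟨j, h⟩)

theorem B_good (xs : List String) (hne : xs ≠ []) :
    ∃ r, produto_mais_vendido_alt xs = some r ∧ Good xs r := by
  have hperm : (PySem.List.sorted2 (epairs xs) (fun t => t.1) (fun t => t.2) false).Perm (epairs xs) :=
    PySem.List.sorted2_perm (epairs xs) (fun t => t.1) (fun t => t.2) false
  have hpw := sorted2_pairwise_lex (epairs xs)
  have Hcnt : ∀ p i, (p, i) ∈ PySem.List.sorted2 (epairs xs) (fun t => t.1) (fun t => t.2) false →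
      (((PySem.List.sorted2 (epairs xs) (fun t => t.1) (fun t => t.2) false).countP
        (fun q => q.1 == p) : Int) = cnt xs p) := by
    intro p i _
    rw [hperm.countP_eq, countP_epairs]
    rfl
  have Hmem : ∀ p i, (p, i) ∈ PySem.List.sorted2 (epairs xs) (fun t => t.1) (fun t => t.2) false →
      (p, fst_idx xs p) ∈ PySem.List.sorted2 (epairs xs) (fun t => t.1) (fun t => t.2) false := by
    intro p i h
    have hp : p ∈ xs := (of_epairs_mem xs p i (hperm.mem_iff.mp h)).1
    exact hperm.mem_iff.mpr (epairs_mem_of xs p hp)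
  have Hmin : ∀ p i, (p, i) ∈ PySem.List.sorted2 (epairs xs) (fun t => t.1) (fun t => t.2) false →
      fst_idx xs p ≤ i := by
    intro p i h
    exact (of_epairs_mem xs p i (hperm.mem_iff.mp h)).2
  have hSne : PySem.List.sorted2 (epairs xs) (fun t => t.1) (fun t => t.2) false ≠ [] := by
    obtain ⟨z, zs, rfl⟩ := List.exists_cons_of_ne_nil hne
    intro hS
    have hz : (z, fst_idx (z :: zs) z) ∈ epairs (z :: zs) :=
      epairs_mem_of _ z List.mem_cons_self
    have := hperm.mem_iff.mpr hz
    rw [hS] at this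
    simp at this
  obtain ⟨hd, rest, hSl⟩ := List.exists_cons_of_ne_nil hSne
  obtain ⟨p, i⟩ := hd
  rw [hSl] at Hcnt Hmem Hmin hpw
  have hin_of_other : ∀ (q : String × Int), q ∈ rest.dropWhile (fun q => q.1 == p) →
      q ∈ (p, i) :: rest := by
    intro q hq
    exact List.mem_cons_of_mem _
      (List.takeWhile_append_dropWhile (p := fun q => q.1 == p) (l := rest) ▸
        List.mem_append_right _ hq)
  have hmem_xs : ∀ (q : String × Int), q ∈ (p, i) :: rest → q.1 ∈ xs := by
    intro q hq
    obtain ⟨q1, q2⟩ := q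
    exact (of_epairs_mem xs q1 q2 (hperm.mem_iff.mp (hSl ▸ hq))).1
  have hBeq : produto_mais_vendido_alt xs
      = scanRuns ((p, i) :: rest) none 0 0 := by
    show scanRuns (PySem.List.sorted2 (epairs xs) (fun t => t.1) (fun t => t.2) false) none 0 0 = _
    rw [hSl]
  rw [hBeq]
  obtain ⟨⟨hc, hfi⟩, ⟨hpw', hcnt', hmem', hmin'⟩, hdecomp⟩ :=
    group_facts p i rest (cnt xs) (fst_idx xs) hpw Hcnt Hmem Hmin
  have hppos : cnt xs p > 0 := by
    have : p ∈ xs := hmem_xs (p, i) List.mem_cons_self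
    unfold cnt
    exact_mod_cast List.count_pos_iff.mpr this
  subst hfi
  rw [scanRuns_cons, hc, if_pos (Or.inl hppos)]
  obtain ⟨r, hr, hmemr, hall⟩ :=
    scanRuns_some (cnt xs) (fst_idx xs) (rest.dropWhile (fun q => q.1 == p)).length
      (rest.dropWhile (fun q => q.1 == p)) (le_refl _) p hpw' hcnt' hmem' hmin'
  refine ⟨r, hr, ?_, ?_⟩
  · rcases hmemr with rfl | ⟨j, hj⟩
    · exact hmem_xs (r, fst_idx xs r) List.mem_cons_self
    · exact hmem_xs (r, j) (hin_of_other _ hj)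
  · intro q hq
    have hqS : (q, fst_idx xs q) ∈ (p, fst_idx xs p) :: rest :=
      hSl ▸ hperm.mem_iff.mpr (epairs_mem_of xs q hq)
    rcases hdecomp q (fst_idx xs q) hqS with rfl | h
    · exact hall q (Or.inl rfl)
    · exact hall q (Or.inr ⟨fst_idx xs q, h⟩)

theorem ports_agree (xs : List String) (hne : xs ≠ []) :
    produto_mais_vendido xs = produto_mais_vendido_alt xs := by
  obtain ⟨r, hA, hG⟩ := A_good xs hne
  obtain ⟨r', hB, hG'⟩ := B_good xs hne
  rw [hA, hB, good_unique xs r r' hG hG']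

-- ===== VERDICT (by name: the statement is the Claim_ definition above) =====
theorem produto_mais_vendido_spec : Claim_equal_produto_mais_vendido := by
  intro produtos _ hne
  exact ports_agree produtos hne
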